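-- pv_equiv track=rewrite | github.com/tac-tics/ploverize | lib/outlines_extended.py | split_stroke
-- ===== SOURCE A (Python) =====
-- def stroke_to_keys(stroke):
--     keys = []
--     i = 0
--     while i < len(stroke):
--         key = stroke[i]
--         i += 1
--         while i < len(stroke) and stroke[i].upper() != stroke[i]:
--             key += stroke[i]
--             i += 1
--         keys.append(key)
--
--     return keys
--
-- def split_stroke(stroke):
--     keys = stroke_to_keys(stroke)
--     mode = 'left'
--
--     middles = ['A', 'O', 'I', 'Ee', 'E', 'U', '*', 'Aw', 'Ow', 'Eye', 'Oo', 'Ea', 'Oh', 'Yoo', 'Oy', 'Ay']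
--     left = []
--     middle = []
--     right = []
--
--     for key in keys:
--         if mode == 'left':
--             if key == '-':
--                 mode = 'right'
--             elif key in middles:
--                 mode = 'middle'
--             else:
--                 left.append(key)
--
--         if mode == 'middle':
--             if key not in middles:
--                 mode = 'right'
--             else:
--                 middle.append(key)
--
--         if mode == 'right':
--             right.append(key)
--
--     if len(middle) == 0 and len(right) > 0:
--         # trim leading '-'
--         right = right[1:]
--
--     return ''.join(left), ''.join(middle), ''.join(right)
-- ===== SOURCE B (Python) =====
-- def stroke_to_keys(stroke):
--     keys = []
--     i = 0
--     while i < len(stroke):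
--         key = stroke[i]
--         i += 1
--         while i < len(stroke) and stroke[i].upper() != stroke[i]:
--             key += stroke[i]
--             i += 1
--         keys.append(key)
--
--     return keys
--
-- _MIDDLES = frozenset(('A', 'O', 'I', 'Ee', 'E', 'U', '*', 'Aw', 'Ow',
--                       'Eye', 'Oo', 'Ea', 'Oh', 'Yoo', 'Oy', 'Ay'))
--
-- def _span(pred, xs):
--     """Longest prefix of xs satisfying pred, and the remaining suffix."""
--     i = 0
--     while i < len(xs) and pred(xs[i]):
--         i += 1
--     return xs[:i], xs[i:]
--
-- def split_stroke(stroke):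
--     keys = stroke_to_keys(stroke)
--     left, rest = _span(lambda k: k != '-' and k not in _MIDDLES, keys)
--     if rest and rest[0] == '-':
--         return ''.join(left), '', ''.join(rest[1:])
--     middle, right = _span(lambda k: k in _MIDDLES, rest)
--     return ''.join(left), ''.join(middle), ''.join(right)
-- ===== Notes on version B (the rewrite author's own statement) =====
-- stated objective: simpler
-- what changed: Replaced A's mode-flag state machine with fall-through if-blocks and a final dash-trim by two explicit phased prefix scans (span): take the left prefix, then either skip a leading dash or take the middle run, the remainder being right.
import Mathlib
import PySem

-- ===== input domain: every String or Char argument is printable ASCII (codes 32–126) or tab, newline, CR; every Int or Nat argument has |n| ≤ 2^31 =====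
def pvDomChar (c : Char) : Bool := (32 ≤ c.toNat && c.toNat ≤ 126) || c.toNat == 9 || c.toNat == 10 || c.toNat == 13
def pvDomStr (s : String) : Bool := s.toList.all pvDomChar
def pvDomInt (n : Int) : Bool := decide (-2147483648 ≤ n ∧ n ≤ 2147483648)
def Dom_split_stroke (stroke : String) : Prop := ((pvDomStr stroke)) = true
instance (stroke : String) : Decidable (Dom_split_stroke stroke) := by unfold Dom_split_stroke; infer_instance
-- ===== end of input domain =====

-- B replaces A's mode-flag state machine by two phased prefix scans (span); same cost, plainer control flow (objective: simpler).

-- ===== PORT A =====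
-- shared helper: stroke_to_keys (identical in Source A and Source B); keys are kept as List Char,
-- ''.join(...) at the end is String.ofList ∘ List.flatten (exact for lists of char-lists).
-- inner while = takeWhile/dropWhile on the predicate stroke[i].upper() != stroke[i] (ASCII-exact via Char.toUpper)
def strokeToKeys : List Char → List (List Char)
  | [] => []
  | c :: rest =>
      (c :: rest.takeWhile (fun d => d.toUpper != d)) ::
        strokeToKeys (rest.dropWhile (fun d => d.toUpper != d))
termination_by l => l.length
decreasing_by
  have := List.length_dropWhile_le (p := fun d : Char => d.toUpper != d) (l := rest)
  simp
  omega

def middlesL : List (List Char) :=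
  [['A'], ['O'], ['I'], ['E','e'], ['E'], ['U'], ['*'], ['A','w'], ['O','w'],
   ['E','y','e'], ['O','o'], ['E','a'], ['O','h'], ['Y','o','o'], ['O','y'], ['A','y']]

-- one iteration of A's for-loop: the three fall-through if-blocks, mode 'left'/'middle'/'right' as 0/1/2
def stepA (st : Nat × List (List Char) × List (List Char) × List (List Char)) (key : List Char) :
    Nat × List (List Char) × List (List Char) × List (List Char) :=
  let (mode, l, m, r) := st
  let (mode, l) :=
    if mode = 0 then
      if key = ['-'] then (2, l)
      else if middlesL.contains key then (1, l)
      else (0, l ++ [key])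
    else (mode, l)
  let (mode, m) :=
    if mode = 1 then
      if middlesL.contains key then (1, m ++ [key]) else (2, m)
    else (mode, m)
  let r := if mode = 2 then r ++ [key] else r
  (mode, l, m, r)

def splitCoreA (keys : List (List Char)) : String × String × String :=
  let res := keys.foldl stepA (0, [], [], [])
  let r := if res.2.2.1 = [] ∧ res.2.2.2 ≠ [] then res.2.2.2.drop 1 else res.2.2.2
  (String.ofList res.2.1.flatten, String.ofList res.2.2.1.flatten, String.ofList r.flatten)

def split_stroke (stroke : String) : String × String × String :=
  splitCoreA (strokeToKeys stroke.toList)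

-- ===== PORT B =====
-- Source B's _span(pred, xs) = (xs.takeWhile pred, xs.dropWhile pred)
def leftKey (k : List Char) : Bool := k != ['-'] && !(middlesL.contains k)

def inMid (k : List Char) : Bool := middlesL.contains k

def splitCoreB (keys : List (List Char)) : String × String × String :=
  let left := keys.takeWhile leftKey
  let rest := keys.dropWhile leftKey
  match rest with
  | ['-'] :: tail => (String.ofList left.flatten, "", String.ofList tail.flatten)
  | _ =>
      (String.ofList left.flatten, String.ofList (rest.takeWhile inMid).flatten,
       String.ofList (rest.dropWhile inMid).flatten)

def split_stroke_alt (stroke : String) : String × String × String :=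
  splitCoreB (strokeToKeys stroke.toList)

-- ===== PRECONDITION & SPEC =====
def Spec_split_stroke (stroke : String) (out : String × String × String) : Prop := out = split_stroke_alt stroke
instance (stroke : String) (out : String × String × String) : Decidable (Spec_split_stroke stroke out) := by unfold Spec_split_stroke; infer_instance

-- ===== CLAIM (what is proved, stated in full; the proofs are below) =====
def Claim_equal_split_stroke : Prop := ∀ (stroke : String), Dom_split_stroke stroke → Spec_split_stroke stroke (split_stroke stroke)

-- ===== LEMMAS AND PROOFS =====

-- evaluation of one loop iteration of A in each mode
theorem stepA_2 (l m r : List (List Char)) (k : List Char) :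
    stepA (2, l, m, r) k = (2, l, m, r ++ [k]) := by simp [stepA]

theorem stepA_1_mid (l m r : List (List Char)) (k : List Char) (h : k ∈ middlesL) :
    stepA (1, l, m, r) k = (1, l, m ++ [k], r) := by simp [stepA, h]

theorem stepA_1_not (l m r : List (List Char)) (k : List Char) (h : k ∉ middlesL) :
    stepA (1, l, m, r) k = (2, l, m, r ++ [k]) := by simp [stepA, h]

theorem stepA_0_dash (l m r : List (List Char)) :
    stepA (0, l, m, r) ['-'] = (2, l, m, r ++ [['-']]) := by simp [stepA]

theorem stepA_0_mid (l m r : List (List Char)) (k : List Char) (hd : k ≠ ['-'])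
    (h : k ∈ middlesL) : stepA (0, l, m, r) k = (1, l, m ++ [k], r) := by
  simp [stepA, hd, h]

theorem stepA_0_left (l m r : List (List Char)) (k : List Char) (hd : k ≠ ['-'])
    (h : k ∉ middlesL) : stepA (0, l, m, r) k = (0, l ++ [k], m, r) := by
  simp [stepA, hd, h]

theorem inMid_eq_true {k : List Char} (h : k ∈ middlesL) : inMid k = true := by
  simp [inMid, h]

theorem inMid_eq_false {k : List Char} (h : k ∉ middlesL) : inMid k = false := by
  simp [inMid, h]

theorem leftKey_eq_true {k : List Char} (hd : k ≠ ['-']) (h : k ∉ middlesL) :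
    leftKey k = true := by simp [leftKey, h, hd]

theorem leftKey_eq_false_dash : leftKey ['-'] = false := by decide

theorem leftKey_eq_false_mid {k : List Char} (h : k ∈ middlesL) : leftKey k = false := by
  simp [leftKey, h]

-- once A is in mode 'right', every remaining key goes to right
theorem foldA_mode2 (keys : List (List Char)) :
    ∀ l m r, keys.foldl stepA (2, l, m, r) = (2, l, m, r ++ keys) := by
  induction keys with
  | nil => simp
  | cons k t ih =>
      intro l m r
      rw [List.foldl_cons, stepA_2, ih]
      simp

-- in mode 'middle', A collects the consecutive middle run, then dumps the rest into right
theorem foldA_mode1 (keys : List (List Char)) :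
    ∀ l m r, keys.foldl stepA (1, l, m, r) =
      ((if keys.dropWhile inMid = [] then 1 else 2), l,
        m ++ keys.takeWhile inMid, r ++ keys.dropWhile inMid) := by
  induction keys with
  | nil => simp
  | cons k t ih =>
      intro l m r
      by_cases hk : k ∈ middlesL
      · rw [List.foldl_cons, stepA_1_mid _ _ _ _ hk, ih]
        simp [inMid_eq_true hk]
      · rw [List.foldl_cons, stepA_1_not _ _ _ _ hk, foldA_mode2]
        simp [inMid_eq_false hk]

-- from mode 'left', A's fold is: left prefix, then a dash-branch or a middle run
theorem foldA_mode0 (keys : List (List Char)) :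
    ∀ l, keys.foldl stepA (0, l, [], []) =
      match keys.dropWhile leftKey with
      | [] => (0, l ++ keys.takeWhile leftKey, ([] : List (List Char)), ([] : List (List Char)))
      | k :: tail =>
          if k = ['-'] then (2, l ++ keys.takeWhile leftKey, [], k :: tail)
          else ((if tail.dropWhile inMid = [] then 1 else 2), l ++ keys.takeWhile leftKey,
                k :: tail.takeWhile inMid, tail.dropWhile inMid) := by
  induction keys with
  | nil => simp
  | cons k t ih =>
      intro l
      by_cases hd : k = ['-']
      · subst hd
        rw [List.foldl_cons, stepA_0_dash, foldA_mode2,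
          List.dropWhile_cons_of_neg (by simp [leftKey_eq_false_dash]),
          List.takeWhile_cons_of_neg (by simp [leftKey_eq_false_dash])]
        simp
      · by_cases hm : k ∈ middlesL
        · rw [List.foldl_cons, stepA_0_mid _ _ _ _ hd hm, foldA_mode1,
            List.dropWhile_cons_of_neg (by simp [leftKey_eq_false_mid hm]),
            List.takeWhile_cons_of_neg (by simp [leftKey_eq_false_mid hm])]
          simp [hd]
        · rw [List.foldl_cons, stepA_0_left _ _ _ _ hd hm, ih,
            List.dropWhile_cons_of_pos (by simp [leftKey_eq_true hd hm]),
            List.takeWhile_cons_of_pos (by simp [leftKey_eq_true hd hm])]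
          cases h : t.dropWhile leftKey with
          | nil => simp
          | cons k2 t2 => by_cases hk2 : k2 = ['-'] <;> simp [hk2]

-- the head of a non-empty dropWhile fails the predicate
theorem dropWhile_head_false {p : List Char → Bool} :
    ∀ (xs ys : List (List Char)) (k : List Char), xs.dropWhile p = k :: ys → p k = false := by
  intro xs
  induction xs with
  | nil => intro ys k h; simp at h
  | cons a t ih =>
      intro ys k h
      by_cases ha : p a = true
      · rw [List.dropWhile_cons_of_pos ha] at h
        exact ih _ _ h
      · rw [List.dropWhile_cons_of_neg ha] at h
        cases h
        simpa using ha

theorem core_eq (keys : List (List Char)) : splitCoreA keys = splitCoreB keys := by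
  unfold splitCoreA splitCoreB
  rw [foldA_mode0]
  cases h : keys.dropWhile leftKey with
  | nil => simp
  | cons k tail =>
      have hk : leftKey k = false := dropWhile_head_false _ _ _ h
      by_cases hd : k = ['-']
      · subst hd
        simp
      · have hm : k ∈ middlesL := by
          by_contra hm
          rw [leftKey_eq_true hd hm] at hk
          exact absurd hk (by simp)
        have hne : k :: tail.takeWhile inMid ≠ [] := by simp
        cases hmode : tail.dropWhile inMid with
        | nil =>
            simp [hne, inMid_eq_true hm, hmode, hd]
        | cons a b =>
            simp [hne, inMid_eq_true hm, hmode, hd]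

-- ===== VERDICT (by name: the statement is the Claim_ definition above) =====
theorem split_stroke_spec : Claim_equal_split_stroke := by
  intro stroke _
  unfold Spec_split_stroke split_stroke split_stroke_alt
  exact core_eq _
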